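-- pv_equiv track=rewrite | github.com/wareenpower/AutoCheck | script/part2_test1/Ryan_Part2_Test1.py | solution
-- ===== SOURCE A (Python) =====
-- def solution(mstr):
--     """
--     count character
--     :param mstr:string
--     :return: [ num, {'character':count, ... }]
--     """
--     result_dic = {}
--     for mchar in mstr:
--         if not mchar.isalnum():
--             continue
--         if mchar in result_dic:
--             result_dic[mchar] = result_dic[mchar] + 1
--             continue
--         result_dic[mchar] = 1
--
--     return len(result_dic), result_dic
-- ===== SOURCE B (Python) =====
-- def solution(mstr):
--     """
--     count character
--     :param mstr:string
--     :return: [ num, {'character':count, ... }]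
--     """
--     seen = []
--     for ch in mstr:
--         if ch.isalnum() and ch not in seen:
--             seen.append(ch)
--     return len(seen), {ch: mstr.count(ch) for ch in seen}
-- ===== Notes on version B (the rewrite author's own statement) =====
-- stated objective: alternative
-- what changed: A counts in one pass into a dict; B first collects the distinct alphanumeric characters in first-occurrence order, then rescans the string with str.count for each of them.
import Mathlib
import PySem

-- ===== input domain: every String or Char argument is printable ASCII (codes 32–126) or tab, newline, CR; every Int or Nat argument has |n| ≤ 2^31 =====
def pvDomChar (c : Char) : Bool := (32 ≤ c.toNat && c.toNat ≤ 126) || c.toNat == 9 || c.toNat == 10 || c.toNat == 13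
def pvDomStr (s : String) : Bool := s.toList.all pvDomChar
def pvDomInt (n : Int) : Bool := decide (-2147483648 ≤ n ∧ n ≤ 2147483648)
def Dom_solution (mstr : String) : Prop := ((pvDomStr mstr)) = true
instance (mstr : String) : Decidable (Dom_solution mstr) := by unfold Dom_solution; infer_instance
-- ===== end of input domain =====

-- B replaces A's single counting pass over a dict by collecting the distinct alphanumeric
-- characters first and then re-counting each one with str.count (alternative decomposition).
-- Python's 1-character strings (dict keys) are modelled as Char and rendered with .toString.

-- ===== PORT A =====
-- result_dic, built by A's loop (alnum test, then in-dict test, then first insertion)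
def solutionDict (mstr : String) : PySem.Dict Char Int :=
  mstr.toList.foldl (fun d c =>
      if !(PySem.Chars.isalnum c) then d
      else if d.contains c then d.modify c 0 (· + 1)
      else d.insert c 1) (PySem.Dict.empty : PySem.Dict Char Int)

def solution (mstr : String) : Int × (List (String × Int)) :=
  (((solutionDict mstr).size : Int),
    (solutionDict mstr).items.map (fun p => (p.1.toString, p.2)))

-- ===== PORT B =====
-- 'seen': distinct alnum characters in first-occurrence order
def solutionSeen (mstr : String) : PySem.Set Char :=
  mstr.toList.foldl (fun s c =>
      if PySem.Chars.isalnum c && !(PySem.Set.contains s c) then s ++ [c] else s)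
      ([] : PySem.Set Char)

def solution_alt (mstr : String) : Int × (List (String × Int)) :=
  (((solutionSeen mstr).length : Int),
    (solutionSeen mstr).map (fun c => (c.toString, (PySem.Str.count mstr c.toString : Int))))

-- ===== PRECONDITION & SPEC =====
def Spec_solution (mstr : String) (out : Int × (List (String × Int))) : Prop := out = solution_alt mstr
instance (mstr : String) (out : Int × (List (String × Int))) : Decidable (Spec_solution mstr out) := by unfold Spec_solution; infer_instance

-- ===== CLAIM (what is proved, stated in full; the proofs are below) =====
def Claim_equal_solution : Prop := ∀ (mstr : String), Dom_solution mstr → Spec_solution mstr (solution mstr)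

-- ===== LEMMAS AND PROOFS =====

-- A's step on an absent key inserts 1, which is exactly Counter's modify step there.
lemma modify_absent {d : PySem.Dict Char Int} {k : Char} (h : d.contains k = false) :
    d.modify k 0 (· + 1) = d.insert k 1 := by
  have hf : List.find? (fun p => p.1 == k) d.items = none := by
    rw [List.find?_eq_none]
    intro p hp
    simp [PySem.Dict.contains] at h
    simpa using h p.1 p.2 hp
  simp [PySem.Dict.modify, PySem.Dict.getD, PySem.Dict.get?, hf]

-- A's dict is Counter of the alnum-filtered character list.
lemma dictA_eq_counter (mstr : String) :
    solutionDict mstr = PySem.Dict.counter (mstr.toList.filter PySem.Chars.isalnum) := by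
  unfold solutionDict
  set cs := mstr.toList
  have h1 : ∀ (d : PySem.Dict Char Int) (c : Char),
      (if !(PySem.Chars.isalnum c) then d
       else if d.contains c then d.modify c 0 (· + 1)
       else d.insert c 1)
      = (if PySem.Chars.isalnum c then d.modify c 0 (· + 1) else d) := by
    intro d c
    by_cases ha : PySem.Chars.isalnum c <;> simp [ha]
    by_cases hc : d.contains c
    · simp [hc]
    · simp [hc, modify_absent (by simpa using hc)]
  calc cs.foldl (fun d c =>
        if !(PySem.Chars.isalnum c) then d
        else if d.contains c then d.modify c 0 (· + 1)
        else d.insert c 1) (PySem.Dict.empty : PySem.Dict Char Int)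
      = cs.foldl (fun d c => if PySem.Chars.isalnum c then d.modify c 0 (· + 1) else d)
          (PySem.Dict.empty : PySem.Dict Char Int) :=
        PySem.List.foldl_congr_mem _ _ _ _ (fun d c _ => h1 d c)
    _ = (cs.filter PySem.Chars.isalnum).foldl (fun d c => d.modify c 0 (· + 1))
          (PySem.Dict.empty : PySem.Dict Char Int) :=
        PySem.List.foldl_if_eq_foldl_filter PySem.Chars.isalnum
          (fun (d : PySem.Dict Char Int) c => d.modify c 0 (· + 1)) cs PySem.Dict.empty
    _ = PySem.Dict.counter (cs.filter PySem.Chars.isalnum) := rfl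

-- B's 'seen' list is the ordered set of the alnum-filtered character list.
lemma seen_eq_ofList (mstr : String) :
    solutionSeen mstr = PySem.Set.ofList (mstr.toList.filter PySem.Chars.isalnum) := by
  unfold solutionSeen
  set cs := mstr.toList
  have h1 : ∀ (s : PySem.Set Char) (c : Char),
      (if PySem.Chars.isalnum c && !(PySem.Set.contains s c) then s ++ [c] else s)
      = (if PySem.Chars.isalnum c then PySem.Set.add s c else s) := by
    intro s c
    by_cases ha : PySem.Chars.isalnum c <;>
      by_cases hc : PySem.Set.contains s c <;>
      simp [ha, PySem.Set.add]
  calc cs.foldl (fun s c =>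
        if PySem.Chars.isalnum c && !(PySem.Set.contains s c) then s ++ [c] else s) []
      = cs.foldl (fun s c => if PySem.Chars.isalnum c then PySem.Set.add s c else s)
          ([] : PySem.Set Char) :=
        PySem.List.foldl_congr_mem _ _ _ _ (fun s c _ => h1 s c)
    _ = (cs.filter PySem.Chars.isalnum).foldl PySem.Set.add [] :=
        PySem.List.foldl_if_eq_foldl_filter PySem.Chars.isalnum PySem.Set.add cs []
    _ = PySem.Set.ofList (cs.filter PySem.Chars.isalnum) :=
        (PySem.Set.ofList_eq_foldl _).symm

-- str.count with a single-character needle counts that character's occurrences.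
lemma count_go_singleton (c : Char) :
    ∀ (l : List Char) (fuel acc : Nat), l.length ≤ fuel →
      PySem.Chars.count.go [c] fuel l acc = acc + l.count c := by
  intro l
  induction l with
  | nil => intro fuel acc _; cases fuel <;> simp [PySem.Chars.count.go]
  | cons h t ih =>
    intro fuel acc hle
    cases fuel with
    | zero => simp at hle
    | succ fuel =>
      have ht : t.length ≤ fuel := by simpa using hle
      by_cases hc : c = h
      · subst hc
        simp [PySem.Chars.count.go, List.isPrefixOf, ih fuel (acc + 1) ht]
        omega
      · have : (c == h) = false := by simp [hc]
        simp [PySem.Chars.count.go, List.isPrefixOf, this, ih fuel acc ht, Ne.symm hc]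

lemma chars_count_singleton (c : Char) (l : List Char) :
    PySem.Chars.count l [c] = l.count c := by
  simp [PySem.Chars.count, count_go_singleton c l l.length 0 (le_refl _)]

-- ===== VERDICT (by name: the statement is the Claim_ definition above) =====
theorem solution_spec : Claim_equal_solution := by
  intro mstr _
  show solution mstr = solution_alt mstr
  unfold solution solution_alt
  rw [dictA_eq_counter, seen_eq_ofList]
  set F := mstr.toList.filter PySem.Chars.isalnum with hF
  rw [PySem.Dict.items_counter F]
  have hsize : (PySem.Dict.counter F).size = (PySem.Set.ofList F).length := by
    have := PySem.Dict.keys_counter F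
    simp only [PySem.Dict.keys] at this
    calc (PySem.Dict.counter F).size
        = ((PySem.Dict.counter F).items.map (·.1)).length := by
          simp [PySem.Dict.size]
      _ = (PySem.Set.ofList F).length := by rw [this]
  refine Prod.ext ?_ ?_
  · simp [hsize]
  · simp only [List.map_map]
    refine List.map_congr_left ?_
    intro c hc
    have hcF : c ∈ F := (PySem.Set.mem_ofList (xs := F) (y := c)).mp hc
    have halnum : PySem.Chars.isalnum c = true := (List.mem_filter.mp hcF).2
    have hfc : F.count c = mstr.toList.count c := by
      rw [hF]; exact List.count_filter halnum
    simp [hfc, chars_count_singleton]
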